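-- pv_equiv track=rewrite | github.com/anaicm/Principio_Programacion_Python | practica 8/13.listas2.py | primerDesordenado
-- ===== SOURCE A (Python) =====
-- def primerDesordenado(a):
--     i=0
--     desordenado=0
--     while i<len(a)-1:
--         if a[i]>a[i+1]:
--             desordenado=i
--         i+=1
--     return desordenado
-- ===== SOURCE B (Python) =====
-- def primerDesordenado(a):
--     for i in range(len(a) - 2, -1, -1):
--         if a[i] > a[i + 1]:
--             return i
--     return 0
-- ===== Notes on version B (the rewrite author's own statement) =====
-- stated objective: alternative
-- what changed: B scans adjacent pairs backwards from the end and returns the first violation immediately (early exit), instead of A's full forward scan that keeps overwriting a running variable.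
import Mathlib
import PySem

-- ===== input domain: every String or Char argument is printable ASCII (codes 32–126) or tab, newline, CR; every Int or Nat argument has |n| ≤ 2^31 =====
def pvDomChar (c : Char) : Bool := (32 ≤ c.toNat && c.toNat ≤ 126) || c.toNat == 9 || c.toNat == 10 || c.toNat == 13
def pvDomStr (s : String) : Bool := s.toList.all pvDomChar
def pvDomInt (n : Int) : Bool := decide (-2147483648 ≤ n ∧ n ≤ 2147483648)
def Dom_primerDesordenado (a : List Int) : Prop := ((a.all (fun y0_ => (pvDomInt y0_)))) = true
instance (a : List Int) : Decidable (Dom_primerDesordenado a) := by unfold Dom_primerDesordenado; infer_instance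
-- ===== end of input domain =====

-- B scans the adjacent pairs backwards with an early return instead of A's full forward scan; same result, no speed claim.

-- ===== PORT A =====
-- A's while loop over i = 0 .. len(a)-2, overwriting `desordenado` at each violation.
def primerDesordenado (a : List Int) : Int :=
  (PySem.List.pyRange 0 ((a.length : Int) - 1) 1).foldl
    (fun d i => if PySem.List.pyGetD a i 0 > PySem.List.pyGetD a (i + 1) 0 then i else d) 0

-- ===== PORT B =====
-- `altGo a k` scans i = k-1, k-2, …, 0 and returns the first i with a[i] > a[i+1], else 0.
def altGo (a : List Int) : Nat → Int
  | 0 => 0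
  | Nat.succ k => if a.getD k 0 > a.getD (k + 1) 0 then (k : Int) else altGo a k

def primerDesordenado_alt (a : List Int) : Int := altGo a (a.length - 1)

-- ===== PRECONDITION & SPEC =====
def Spec_primerDesordenado (a : List Int) (out : Int) : Prop := out = primerDesordenado_alt a
instance (a : List Int) (out : Int) : Decidable (Spec_primerDesordenado a out) := by unfold Spec_primerDesordenado; infer_instance

-- ===== CLAIM (what is proved, stated in full; the proofs are below) =====
def Claim_equal_primerDesordenado : Prop := ∀ (a : List Int), Dom_primerDesordenado a → Spec_primerDesordenado a (primerDesordenado a)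

-- ===== LEMMAS AND PROOFS =====

-- A's forward fold over range m equals B's backward scan from m, for every m.
theorem fold_eq_altGo (a : List Int) (m : Nat) :
    (PySem.List.pyRange 0 (m : Int) 1).foldl
      (fun d i => if PySem.List.pyGetD a i 0 > PySem.List.pyGetD a (i + 1) 0 then i else d) 0
    = altGo a m := by
  induction m with
  | zero => simp [PySem.List.pyRange_one_eq_nil, altGo]
  | succ k ih =>
    rw [show ((Nat.succ k : Nat) : Int) = (k : Int) + 1 by push_cast; ring,
        PySem.List.pyRange_one_succ_right (Int.natCast_nonneg k), List.foldl_append, ih]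
    simp only [List.foldl_cons, List.foldl_nil]
    rw [show (k : Int) + 1 = ((k + 1 : Nat) : Int) by push_cast; ring]
    simp only [PySem.List.pyGetD_natCast, altGo]

theorem primerDesordenado_spec : Claim_equal_primerDesordenado := by
  intro a _
  unfold Spec_primerDesordenado primerDesordenado primerDesordenado_alt
  cases a with
  | nil => simp [PySem.List.pyRange_one_eq_nil, altGo]
  | cons x xs =>
    have h : ((x :: xs).length : Int) - 1 = ((x :: xs).length - 1 : Nat) := by
      simp
    rw [h, fold_eq_altGo]
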